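-- pv_equiv track=rewrite | github.com/JungTag/Algorithm_Study | CT/11/c1.py | solution
-- ===== SOURCE A (Python) =====
-- def solution(phone_numbers, phone_owners, number):
--     phone_dict = dict()
--
--     for i in range(len(phone_numbers)):
--         phone_number = phone_numbers[i]
--         phone_owner = phone_owners[i]
--         phone_dict[phone_number] = phone_owner
--
--     if number in phone_dict:
--         return phone_dict[number]
--     else:
--         return number
-- ===== SOURCE B (Python) =====
-- def solution(phone_numbers, phone_owners, number):
--     # Search the phone book backwards and stop at the first hit: because later
--     # entries overwrite earlier ones in A's dict, the last occurrence is the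
--     # one that counts, and scanning from the end finds it first.
--     for i in range(len(phone_numbers) - 1, -1, -1):
--         if phone_numbers[i] == number:
--             return phone_owners[i]
--     return number
-- ===== Notes on version B (the rewrite author's own statement) =====
-- stated objective: simpler
-- what changed: B builds no dictionary and keeps no accumulator: it searches the number list backwards and returns the owner of the first hit (early exit), which is the last occurrence and hence matches A's dict-overwrite semantics; default is number.
import Mathlib
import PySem

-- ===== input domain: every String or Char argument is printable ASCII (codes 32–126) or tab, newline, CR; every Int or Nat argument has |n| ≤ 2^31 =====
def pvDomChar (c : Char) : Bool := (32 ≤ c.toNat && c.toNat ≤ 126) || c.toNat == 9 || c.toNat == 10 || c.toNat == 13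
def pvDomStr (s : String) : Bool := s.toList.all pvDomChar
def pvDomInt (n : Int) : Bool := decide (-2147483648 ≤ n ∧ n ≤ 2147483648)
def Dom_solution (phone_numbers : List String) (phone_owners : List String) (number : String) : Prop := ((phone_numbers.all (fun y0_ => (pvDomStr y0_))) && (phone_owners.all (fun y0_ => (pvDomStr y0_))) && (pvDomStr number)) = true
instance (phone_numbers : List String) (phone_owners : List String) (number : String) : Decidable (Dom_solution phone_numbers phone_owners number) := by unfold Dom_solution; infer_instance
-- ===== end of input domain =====

-- B replaces A's build-a-dict-then-lookup with a backward early-exit search for the last occurrence (simpler; return value only).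

-- ===== PORT A =====
-- A builds a dict mapping each phone number to its owner (later entries overwrite), then looks up `number`.
def solution (phone_numbers : List String) (phone_owners : List String) (number : String) : String :=
  let phone_dict : PySem.Dict String String :=
    (PySem.List.pyRange 0 (phone_numbers.length : Int) 1).foldl
      (fun d i =>
        let phone_number := PySem.List.pyGetD phone_numbers i ""
        let phone_owner := PySem.List.pyGetD phone_owners i ""
        d.insert phone_number phone_owner)
      PySem.Dict.empty
  if phone_dict.contains number then phone_dict.getD number number else number

-- ===== PORT B =====
-- B: walk the indices backwards (range(len-1, -1, -1)); return the owner at the first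
-- index whose number matches (early exit = Python's `return` inside the loop), else `number`.
def solutionAltGo (phone_numbers : List String) (phone_owners : List String) (number : String) : List Int → String
  | [] => number
  | i :: is =>
      if PySem.List.pyGetD phone_numbers i "" = number then PySem.List.pyGetD phone_owners i ""
      else solutionAltGo phone_numbers phone_owners number is

def solution_alt (phone_numbers : List String) (phone_owners : List String) (number : String) : String :=
  solutionAltGo phone_numbers phone_owners number
    (PySem.List.pyRange ((phone_numbers.length : Int) - 1) (-1) (-1))

-- ===== PRECONDITION & SPEC =====
-- Pre_ excludes inputs where phone_owners is shorter than phone_numbers: there A raises IndexError at phone_owners[i].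
def Pre_solution (phone_numbers : List String) (phone_owners : List String) (number : String) : Prop :=
  phone_numbers.length ≤ phone_owners.length
instance (phone_numbers : List String) (phone_owners : List String) (number : String) : Decidable (Pre_solution phone_numbers phone_owners number) := by unfold Pre_solution; infer_instance
def pvWitness_solution : List String × List String × String := (["123", "456"], ["kim", "lee"], "456")

def Spec_solution (phone_numbers : List String) (phone_owners : List String) (number : String) (out : String) : Prop := out = solution_alt phone_numbers phone_owners number
instance (phone_numbers : List String) (phone_owners : List String) (number : String) (out : String) : Decidable (Spec_solution phone_numbers phone_owners number out) := by unfold Spec_solution; infer_instance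

-- ===== CLAIM (what is proved, stated in full; the proofs are below) =====
def Claim_equal_solution : Prop := ∀ (phone_numbers : List String) (phone_owners : List String) (number : String), Dom_solution phone_numbers phone_owners number → Pre_solution phone_numbers phone_owners number → Spec_solution phone_numbers phone_owners number (solution phone_numbers phone_owners number)

-- ===== LEMMAS AND PROOFS =====

-- first-match scan over a pair list (proof-side view of B's early-exit loop)
def firstM (n d : String) : List (String × String) → String
  | [] => d
  | p :: ps => if p.1 = n then p.2 else firstM n d ps

theorem firstM_append_singleton (n d : String) (p : String × String) :
    ∀ (xs : List (String × String)),
      firstM n d (xs ++ [p]) = firstM n (if p.1 = n then p.2 else d) xs := by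
  intro xs
  induction xs with
  | nil => simp [firstM]
  | cons q qs ih => simp [firstM, ih]

-- The dict-lookup view of A's fold equals the forward last-match scan, for any aligned pair list.
theorem dict_fold_eq_scan (n : String) :
    ∀ (ps : List (String × String)) (d : PySem.Dict String String) (r : String),
      (if d.contains n then d.getD n n else n) = r →
      (let d' := ps.foldl (fun dd p => dd.insert p.1 p.2) d
       if d'.contains n then d'.getD n n else n)
      = ps.foldl (fun result p => if p.1 = n then p.2 else result) r := by
  intro ps
  induction ps with
  | nil => intro d r h; simpa using h
  | cons p ps ih =>
      intro d r h
      simp only [List.foldl_cons]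
      apply ih
      by_cases hk : p.1 = n
      · subst hk
        simp
      · rw [PySem.Dict.contains_insert, PySem.Dict.getD_insert]
        have hne : n ≠ p.1 := fun he => hk he.symm
        simp [hne, hk, h]

-- A's index loop over range(len(phone_numbers)) is the fold over the zipped pairs (when owners is long enough).
theorem range_fold_eq_zip_fold (a b : List String) (h : a.length ≤ b.length)
    (d : PySem.Dict String String) :
    (PySem.List.pyRange 0 (a.length : Int) 1).foldl
      (fun dd i => dd.insert (PySem.List.pyGetD a i "") (PySem.List.pyGetD b i "")) d
    = (a.zip b).foldl (fun dd p => dd.insert p.1 p.2) d := by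
  have hlen : (a.zip b).length = a.length := by
    simp [List.length_zip]; omega
  have hcong :
      (PySem.List.pyRange 0 (a.length : Int) 1).foldl
        (fun dd i => dd.insert (PySem.List.pyGetD a i "") (PySem.List.pyGetD b i "")) d
      = (PySem.List.pyRange 0 ((a.zip b).length : Int) 1).foldl
        (fun dd i => dd.insert (PySem.List.pyGetD (a.zip b) i ("", "")).1
                               (PySem.List.pyGetD (a.zip b) i ("", "")).2) d := by
    rw [hlen]
    apply PySem.List.foldl_congr_mem
    intro acc i hi
    rw [PySem.List.mem_pyRange_one] at hi
    have h1 : i < (a.length : Int) := hi.2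
    rw [PySem.List.pyGetD_eq_getElem a "" hi.1 h1,
        PySem.List.pyGetD_eq_getElem b "" hi.1 (by omega),
        PySem.List.pyGetD_eq_getElem (a.zip b) ("", "") hi.1 (by omega)]
    simp [List.getElem_zip]
  rw [hcong]
  exact PySem.List.foldl_pyRange_zero_pyGetD' (a.zip b) ("", "")
    (fun dd p => dd.insert p.1 p.2) d

-- forward last-match fold = firstM on the reversed list
theorem lastmatch_eq_firstM_rev (n : String) :
    ∀ (ps : List (String × String)) (r : String),
      ps.foldl (fun result p => if p.1 = n then p.2 else result) r = firstM n r ps.reverse := by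
  intro ps
  induction ps with
  | nil => intro r; simp [firstM]
  | cons p ps ih =>
      intro r
      simp only [List.foldl_cons, List.reverse_cons]
      rw [ih, firstM_append_singleton]

-- B's backward index walk = firstM over the reversed zip
theorem go_eq_firstM (a b : List String) (n : String) (h : a.length ≤ b.length) :
    solutionAltGo a b n (PySem.List.pyRange ((a.length : Int) - 1) (-1) (-1))
      = firstM n n (a.zip b).reverse := by
  rw [PySem.List.pyRange_neg_one_eq_reverse]
  have h0 : ((-1 : Int) + 1) = 0 := by norm_num
  have h1 : ((a.length : Int) - 1 + 1) = (a.length : Int) := by ring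
  rw [h0, h1]
  have hmap : (PySem.List.pyRange 0 (a.length : Int) 1).map
      (fun i => (PySem.List.pyGetD a i "", PySem.List.pyGetD b i "")) = a.zip b := by
    apply List.ext_getElem
    · simp [PySem.List.length_pyRange_one, List.length_zip]; omega
    · intro k hk1 hk2
      have hkr : k < (PySem.List.pyRange 0 (a.length : Int) 1).length := by
        simpa [List.length_map] using hk1
      have hka : k < a.length := by
        simpa [PySem.List.length_pyRange_one] using hkr
      have hkb : k < b.length := by omega
      rw [List.getElem_map, PySem.List.getElem_pyRange_one]
      rw [PySem.List.pyGetD_eq_getElem a "" (by positivity) (by omega),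
          PySem.List.pyGetD_eq_getElem b "" (by positivity) (by omega),
          List.getElem_zip]
      simp
  rw [← hmap, ← List.map_reverse]
  generalize (PySem.List.pyRange 0 (a.length : Int) 1).reverse = is
  induction is with
  | nil => simp [solutionAltGo, firstM]
  | cons i is ih =>
      simp only [List.map_cons, solutionAltGo, firstM]
      split <;> simp_all

-- ===== VERDICT (by name: the statement is the Claim_ definition above) =====
theorem solution_spec : Claim_equal_solution := by
  intro a b n _ hpre
  show solution a b n = solution_alt a b n
  unfold solution solution_alt
  rw [range_fold_eq_zip_fold a b hpre,
      dict_fold_eq_scan n (a.zip b) PySem.Dict.empty n (by simp),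
      lastmatch_eq_firstM_rev]
  exact (go_eq_firstM a b n hpre).symm
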